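-- pv_equiv track=rewrite | github.com/mahmoud/hematite | hematite/url.py | unquote_unreserved
-- ===== SOURCE A (Python) =====
-- _UNRESERVED_CHARS = frozenset(
--     "ABCDEFGHIJKLMNOPQRSTUVWXYZabcdefghijklmnopqrstuvwxyz"
--     "0123456789-._~")
--
-- def unquote_unreserved(url):
--     """\
--     Un-escape any percent-escape sequences in a URI that are unreserved
--     characters. This leaves all reserved, illegal and non-ASCII bytes encoded.
--     """
--     parts = url.split('%')
--     for i in range(1, len(parts)):
--         h = parts[i][0:2]
--         if len(h) == 2 and h.isalnum():
--             c = chr(int(h, 16))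
--             if c in _UNRESERVED_CHARS:
--                 parts[i] = c + parts[i][2:]
--             else:
--                 parts[i] = '%' + parts[i]
--         else:
--             parts[i] = '%' + parts[i]
--     return ''.join(parts)
-- ===== SOURCE B (Python) =====
-- _UNRESERVED_CHARS = frozenset(
--     "ABCDEFGHIJKLMNOPQRSTUVWXYZabcdefghijklmnopqrstuvwxyz"
--     "0123456789-._~")
--
-- _HEX_DIGITS = "0123456789abcdefABCDEF"
-- _HEX_LOWER = "0123456789abcdef"
--
--
-- def _hexval(c):
--     return _HEX_LOWER.index(c.lower())
--
--
-- def unquote_unreserved(url):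
--     """Single left-to-right scan: decode %XX only when XX is a hex pair
--     whose byte is an unreserved character; everything else is copied."""
--     out = []
--     i = 0
--     n = len(url)
--     while i < n:
--         ch = url[i]
--         if ch == '%' and i + 3 <= n and url[i + 1] in _HEX_DIGITS and url[i + 2] in _HEX_DIGITS:
--             c = chr(16 * _hexval(url[i + 1]) + _hexval(url[i + 2]))
--             if c in _UNRESERVED_CHARS:
--                 out.append(c)
--                 i += 3
--                 continue
--         out.append(ch)
--         i += 1
--     return ''.join(out)
-- ===== Notes on version B (the rewrite author's own statement) =====
-- stated objective: alternative
-- what changed: Replaces the split-on-percent-sign, patch-each-part, rejoin structure with a single index-driven left-to-right scan that decodes a hex escape pair in place; B tests for two hex digits directly instead of isalnum+int, so it never hits int()'s ValueError.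
-- crash fix: A raises ValueError when a percent sign is followed by two alphanumeric characters that are not a valid hex pair (e.g. '%zz'); B simply copies the characters through and returns the string unchanged there. — e.g. on unquote_unreserved("%zz"): A raises ValueError, B returns "%zz"
import Mathlib
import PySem

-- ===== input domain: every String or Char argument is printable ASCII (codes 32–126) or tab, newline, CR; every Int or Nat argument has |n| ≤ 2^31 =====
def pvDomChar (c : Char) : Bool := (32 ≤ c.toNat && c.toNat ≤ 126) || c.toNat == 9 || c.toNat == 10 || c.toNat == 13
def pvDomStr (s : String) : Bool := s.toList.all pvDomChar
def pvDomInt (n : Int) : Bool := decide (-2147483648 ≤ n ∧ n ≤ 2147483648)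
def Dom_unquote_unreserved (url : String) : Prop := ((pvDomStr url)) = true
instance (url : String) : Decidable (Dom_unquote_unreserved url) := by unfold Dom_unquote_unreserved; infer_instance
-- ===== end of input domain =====

-- B replaces A's split-on-percent/patch-parts/rejoin with a single index scan that decodes
-- a hex escape pair in place (objective: alternative); where A raises ValueError on a percent
-- sign followed by two alphanumeric non-hex chars, B just copies them through (Raises_ block).


-- ===== PORT A =====
-- _UNRESERVED_CHARS (a frozenset literal)
def pvUnreserved : PySem.Set Char :=
  PySem.Set.ofList
    ("ABCDEFGHIJKLMNOPQRSTUVWXYZabcdefghijklmnopqrstuvwxyz0123456789-._~".toList)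

-- the loop body applied to parts[i] (i ≥ 1)
def pvProcA (p : List Char) : List Char :=
  let h := PySem.List.slice p (some 0) (some 2)            -- parts[i][0:2]
  if h.length = 2 ∧ PySem.Chars.strIsalnum h = true then
    match PySem.Int.ofCharsBase? h 16 with                 -- int(h, 16)
    | some n =>
      let c := Char.ofNat n.toNat                          -- chr(...)
      if c ∈ pvUnreserved then c :: PySem.List.slice p (some 2) none  -- c + parts[i][2:]
      else '%' :: p                                        -- '%' + parts[i]
    | none => []                                           -- int(h,16) raises ValueError: excluded by Pre_
  else '%' :: p                                            -- '%' + parts[i]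

def unquote_unreserved (url : String) : String :=
  let parts := PySem.Chars.splitOn url.toList ['%']        -- url.split('%')
  -- for i in range(1, len(parts)): parts[i] = <loop body>   (elementwise update of the tail)
  let parts' := match parts with
    | [] => []
    | p0 :: rest => p0 :: rest.map pvProcA
  String.ofList (PySem.Chars.join [] parts')                   -- ''.join(parts)

-- ===== PORT B =====
def pvHexDigits : List Char := "0123456789abcdefABCDEF".toList   -- _HEX_DIGITS
def pvHexLower : List Char := "0123456789abcdef".toList          -- _HEX_LOWER

-- _hexval(c) = _HEX_LOWER.index(c.lower()); only called on hex digits, where index succeeds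
def pvHexval (c : Char) : Nat :=
  (PySem.Chars.find pvHexLower [PySem.Chars.lowerChar c]).toNat

-- the while loop: the i-scan rendered as recursion on the remaining characters;
-- the arm 'ch :: a :: b :: rest2' is the case 'i + 3 <= n' of B's combined condition
def pvScanB : List Char → List Char
  | [] => []
  | ch :: a :: b :: rest2 =>
    if ch == '%' && PySem.Chars.isIn [a] pvHexDigits && PySem.Chars.isIn [b] pvHexDigits then
      let c := Char.ofNat (16 * pvHexval a + pvHexval b)    -- chr(16*_hexval(..) + _hexval(..))
      if c ∈ pvUnreserved then c :: pvScanB rest2           -- decoded: i += 3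
      else ch :: pvScanB (a :: b :: rest2)                  -- copy ch: i += 1
    else ch :: pvScanB (a :: b :: rest2)                    -- copy ch: i += 1
  | ch :: rest => ch :: pvScanB rest                        -- near the end: copy ch

def unquote_unreserved_alt (url : String) : String :=
  String.ofList (pvScanB url.toList)

-- ===== PRECONDITION & SPEC =====
def pvIsHexDigit (c : Char) : Bool := ("0123456789abcdefABCDEF".toList).contains c

-- Pre_ excludes exactly the inputs where A raises ValueError: a '%' followed by two
-- alphanumeric characters that are not both hex digits (int(h, 16) fails there).
def Pre_unquote_unreserved (url : String) : Prop :=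
  ∀ i < url.toList.length, i + 2 < url.toList.length →
    url.toList[i]! = '%' →
    (PySem.Chars.isalnum url.toList[i+1]! && PySem.Chars.isalnum url.toList[i+2]!) = true →
    (pvIsHexDigit url.toList[i+1]! && pvIsHexDigit url.toList[i+2]!) = true

instance (url : String) : Decidable (Pre_unquote_unreserved url) := by
  unfold Pre_unquote_unreserved; infer_instance

def pvWitness_unquote_unreserved : String := "a%20b%7E%4%"

-- A raises ValueError when some '%' is followed by two alphanumeric characters that are
-- not a valid hex pair (e.g. "%zz"); B copies the characters through unchanged.
def Raises_unquote_unreserved (url : String) : Prop :=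
  ∃ i < url.toList.length, i + 2 < url.toList.length ∧
    url.toList[i]! = '%' ∧
    (PySem.Chars.isalnum url.toList[i+1]! && PySem.Chars.isalnum url.toList[i+2]!) = true ∧
    (pvIsHexDigit url.toList[i+1]! && pvIsHexDigit url.toList[i+2]!) = false

instance (url : String) : Decidable (Raises_unquote_unreserved url) := by
  unfold Raises_unquote_unreserved; infer_instance

def pvRaiseWitness_unquote_unreserved : String := "%zz"
def pvRaiseWitnessOut_unquote_unreserved : String := "%zz"

def Spec_unquote_unreserved (url : String) (out : String) : Prop := out = unquote_unreserved_alt url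
instance (url : String) (out : String) : Decidable (Spec_unquote_unreserved url out) := by unfold Spec_unquote_unreserved; infer_instance

-- ===== CLAIM (what is proved, stated in full; the proofs are below) =====
def Claim_equal_unquote_unreserved : Prop := ∀ (url : String), Dom_unquote_unreserved url → Pre_unquote_unreserved url → Spec_unquote_unreserved url (unquote_unreserved url)

def Claim_raises_unquote_unreserved : Prop :=
  (∀ (url : String), Dom_unquote_unreserved url → Raises_unquote_unreserved url → ¬ Pre_unquote_unreserved url) ∧
  (Dom_unquote_unreserved (pvRaiseWitness_unquote_unreserved) ∧ Raises_unquote_unreserved (pvRaiseWitness_unquote_unreserved) ∧ unquote_unreserved_alt (pvRaiseWitness_unquote_unreserved) = pvRaiseWitnessOut_unquote_unreserved)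

-- ===== LEMMAS AND PROOFS =====

-- the split structure: first part and the remaining parts of l.split('%')
def pvSp : List Char → List Char × List (List Char)
  | [] => ([], [])
  | c :: rest =>
    let r := pvSp rest
    if c = '%' then ([], r.1 :: r.2) else (c :: r.1, r.2)

lemma pvGo_eq : ∀ (fuel : Nat) (l cur : List Char) (acc : List (List Char)), l.length ≤ fuel →
    PySem.Chars.splitOn.go ['%'] fuel l cur acc =
      acc.reverse ++ ((cur.reverse ++ (pvSp l).1) :: (pvSp l).2) := by
  intro fuel
  induction fuel with
  | zero =>
    intro l cur acc h
    have hl : l = [] := by cases l <;> simp_all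
    subst hl
    rw [PySem.Chars.splitOn.go]
    simp [pvSp]
  | succ n ih =>
    intro l cur acc h
    cases l with
    | nil =>
      rw [PySem.Chars.splitOn.go]
      · simp [pvSp]
      · simp
    | cons c rest =>
      rw [PySem.Chars.splitOn.go]
      simp only [List.isPrefixOf, Bool.and_true, List.length_cons] at *
      by_cases hc : c = '%'
      · subst hc
        simp only [beq_self_eq_true, if_pos, List.length_nil, Nat.zero_add, List.drop_succ_cons,
          List.drop_zero]
        rw [ih rest [] (cur.reverse :: acc) (by omega)]
        simp [pvSp]
      · rw [if_neg (by simpa using fun hh => hc hh.symm)]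
        rw [ih rest (c :: cur) acc (by omega)]
        simp [pvSp, hc]

lemma pvSplitOn_eq (l : List Char) :
    PySem.Chars.splitOn l ['%'] = (pvSp l).1 :: (pvSp l).2 := by
  show PySem.Chars.splitOn.go ['%'] (l.length + 1) l [] [] = _
  rw [pvGo_eq (l.length + 1) l [] [] (by omega)]
  simp

lemma pvJoin_nil_flatten (ps : List (List Char)) : PySem.Chars.join [] ps = ps.flatten := by
  induction ps with
  | nil => simp [PySem.Chars.join_nil]
  | cons p rest ih =>
    cases rest with
    | nil => simp [PySem.Chars.join_singleton]
    | cons q r =>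
      rw [PySem.Chars.join_cons_cons]
      simp only [List.flatten_cons]
      rw [ih]
      simp

-- the hex-digit alphabet, as a plain character list
def pvH : List Char := "0123456789abcdefABCDEF".toList

lemma pvD1all : (pvH.all (fun c => PySem.Chars.isalnum c && !(c == '%'))) = true := by decide

set_option maxHeartbeats 2000000 in
lemma pvD2all : (pvH.all (fun a => pvH.all (fun b =>
    PySem.Int.ofCharsBase? [a,b] 16 == some ((16 * pvHexval a + pvHexval b : Nat) : Int)))) = true := by
  decide

lemma pvD1 {c : Char} (h : c ∈ pvH) : PySem.Chars.isalnum c = true ∧ c ≠ '%' := by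
  have h1 := pvD1all
  simp only [List.all_eq_true, Bool.and_eq_true, Bool.not_eq_true', beq_eq_false_iff_ne] at h1
  exact h1 c h

lemma pvD2 {a b : Char} (ha : a ∈ pvH) (hb : b ∈ pvH) :
    PySem.Int.ofCharsBase? [a,b] 16 = some ((16 * pvHexval a + pvHexval b : Nat) : Int) := by
  have h2 := pvD2all
  simp only [List.all_eq_true, beq_iff_eq] at h2
  exact h2 a ha b hb

lemma pvSingletonInfix {c : Char} {l : List Char} : [c] <:+: l ↔ c ∈ l := by
  constructor
  · intro h
    exact h.subset (List.mem_singleton_self c)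
  · intro h
    obtain ⟨s, t, rfl⟩ := List.mem_iff_append.mp h
    exact ⟨s, t, by simp⟩

lemma pvHexMem (c : Char) : PySem.Chars.isIn [c] pvHexDigits = true ↔ c ∈ pvH := by
  rw [PySem.Chars.isIn_iff_infix]
  exact pvSingletonInfix

lemma pvHexPre (c : Char) : pvIsHexDigit c = true ↔ c ∈ pvH := by
  unfold pvIsHexDigit pvH
  exact List.contains_iff_mem

lemma pvSliceTake (xs : List Char) : PySem.List.slice xs (some 0) (some 2) = xs.take 2 := by
  have h := PySem.List.slice_natCast xs 0 2
  simpa using h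

lemma pvSliceTake2 (xs : List Char) : PySem.List.slice xs none (some 2) = xs.take 2 :=
  PySem.List.slice_to xs (by omega)

lemma pvSliceDrop (xs : List Char) : PySem.List.slice xs (some 2) none = xs.drop 2 := by
  have h := PySem.List.slice_from xs (a := 2) (by omega)
  simpa using h

-- unfolding lemmas for pvScanB
lemma pvScanB_cons_ne {c : Char} {rest : List Char} (hc : c ≠ '%') :
    pvScanB (c :: rest) = c :: pvScanB rest := by
  match rest with
  | [] => rfl
  | [a] => rfl
  | a :: b :: t => simp [pvScanB, hc]

lemma pvScanB_pct_nil : pvScanB ['%'] = ['%'] := rfl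

lemma pvScanB_pct_one (a : Char) : pvScanB ['%', a] = '%' :: pvScanB [a] := by
  match a with
  | a => rfl

lemma pvScanB_pct_pair (a b : Char) (rest2 : List Char) :
    pvScanB ('%' :: a :: b :: rest2) =
      if (PySem.Chars.isIn [a] pvHexDigits && PySem.Chars.isIn [b] pvHexDigits) = true then
        (if Char.ofNat (16 * pvHexval a + pvHexval b) ∈ pvUnreserved then
          Char.ofNat (16 * pvHexval a + pvHexval b) :: pvScanB rest2
        else '%' :: pvScanB (a :: b :: rest2))
      else '%' :: pvScanB (a :: b :: rest2) := by
  simp [pvScanB]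

-- the Pre_ condition, on the character-list side
def pvPreL (l : List Char) : Prop :=
  ∀ i < l.length, i + 2 < l.length → l[i]! = '%' →
    (PySem.Chars.isalnum l[i+1]! && PySem.Chars.isalnum l[i+2]!) = true →
    (pvIsHexDigit l[i+1]! && pvIsHexDigit l[i+2]!) = true

lemma pvPreShift {c : Char} {rest : List Char} (h : pvPreL (c :: rest)) : pvPreL rest := by
  intro i hi h2 he ha
  have h' := h (i+1) (by simp; omega) (by simp; omega)
  simp only [List.getElem!_cons_succ] at h'
  exact h' he ha

lemma pvMain : ∀ n l, List.length l ≤ n → pvPreL l →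
    pvScanB l = (pvSp l).1 ++ (((pvSp l).2).map pvProcA).flatten := by
  intro n
  induction n with
  | zero =>
    intro l h _
    have hl : l = [] := by cases l <;> simp_all
    subst hl
    simp [pvScanB, pvSp]
  | succ n ih =>
    intro l hl hp
    match l with
    | [] => simp [pvScanB, pvSp]
    | c :: rest =>
      simp only [List.length_cons] at hl
      by_cases hc : c = '%'
      · subst hc
        match rest with
        | [] => simp [pvScanB_pct_nil, pvSp, pvProcA, pvSliceTake2]
        | [a] =>
          by_cases ha : a = '%'
          · subst ha
            rw [pvScanB_pct_one, pvScanB_pct_nil]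
            simp [pvSp, pvProcA, pvSliceTake2]
          · rw [pvScanB_pct_one, pvScanB_cons_ne ha]
            simp [pvScanB, pvSp, pvProcA, pvSliceTake2, ha]
        | a :: b :: rest2 =>
          simp only [List.length_cons] at hl
          rw [pvScanB_pct_pair]
          by_cases hab : a ∈ pvH ∧ b ∈ pvH
          · obtain ⟨ha, hb⟩ := hab
            obtain ⟨halnA, hneA⟩ := pvD1 ha
            obtain ⟨halnB, hneB⟩ := pvD1 hb
            have hsp : pvSp ('%' :: a :: b :: rest2) =
                ([], (a :: b :: (pvSp rest2).1) :: (pvSp rest2).2) := by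
              simp [pvSp, hneA, hneB]
            have hprocA : pvProcA (a :: b :: (pvSp rest2).1) =
                (if Char.ofNat (16 * pvHexval a + pvHexval b) ∈ pvUnreserved then
                   Char.ofNat (16 * pvHexval a + pvHexval b) :: (pvSp rest2).1
                 else '%' :: a :: b :: (pvSp rest2).1) := by
              unfold pvProcA
              rw [pvSliceTake]
              simp only [List.take_succ_cons, List.take_zero]
              rw [if_pos (by simp [PySem.Chars.strIsalnum, halnA, halnB])]
              rw [pvD2 ha hb]
              have hcast : ((16 * (pvHexval a : Int) + (pvHexval b : Int))).toNat
                  = 16 * pvHexval a + pvHexval b := by omega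
              simp only [pvSliceDrop, Nat.cast_add, Nat.cast_mul, Nat.cast_ofNat, hcast,
                List.drop_succ_cons, List.drop_zero]
            have hcond : (PySem.Chars.isIn [a] pvHexDigits && PySem.Chars.isIn [b] pvHexDigits) = true := by
              rw [Bool.and_eq_true, pvHexMem, pvHexMem]; exact ⟨ha, hb⟩
            rw [if_pos hcond, hsp]
            simp only [List.map_cons, List.flatten_cons, List.nil_append]
            rw [hprocA]
            by_cases hun : Char.ofNat (16 * pvHexval a + pvHexval b) ∈ pvUnreserved
            · rw [if_pos hun, if_pos hun]
              rw [ih rest2 (by omega) (pvPreShift (pvPreShift (pvPreShift hp)))]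
              simp
            · rw [if_neg hun, if_neg hun]
              rw [ih (a :: b :: rest2) (by simp only [List.length_cons]; omega) (pvPreShift hp)]
              have hsp2 : pvSp (a :: b :: rest2) =
                  (a :: b :: (pvSp rest2).1, (pvSp rest2).2) := by
                simp [pvSp, hneA, hneB]
              rw [hsp2]
              simp
          · -- not both hex digits: B copies the '%'; A's part cannot pass the decode test
            have hBcond : (PySem.Chars.isIn [a] pvHexDigits && PySem.Chars.isIn [b] pvHexDigits) = false := by
              rcases Bool.eq_false_or_eq_true (PySem.Chars.isIn [a] pvHexDigits) with h1 | h1 <;>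
                rcases Bool.eq_false_or_eq_true (PySem.Chars.isIn [b] pvHexDigits) with h2 | h2 <;>
                  simp_all [pvHexMem]
            have hproc : pvProcA ((pvSp (a :: b :: rest2)).1) = '%' :: (pvSp (a :: b :: rest2)).1 := by
              by_cases haP : a = '%'
              · subst haP; simp [pvSp, pvProcA, pvSliceTake2]
              · by_cases hbP : b = '%'
                · subst hbP; simp [pvSp, haP, pvProcA, pvSliceTake2]
                · have hnand : ¬ ((PySem.Chars.isalnum a && PySem.Chars.isalnum b) = true) := by
                    intro hAln
                    have h0 := hp 0 (by simp) (by simp) (by simp)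
                      (by simpa using hAln)
                    simp only [List.getElem!_cons_succ, List.getElem!_cons_zero,
                      Bool.and_eq_true, pvHexPre] at h0
                    exact hab h0
                  have hsp2 : pvSp (a :: b :: rest2) =
                      (a :: b :: (pvSp rest2).1, (pvSp rest2).2) := by
                    simp [pvSp, haP, hbP]
                  rw [hsp2]
                  unfold pvProcA
                  rw [pvSliceTake]
                  simp only [List.take_succ_cons, List.take_zero]
                  rw [if_neg (by
                    rintro ⟨-, hAl⟩
                    apply hnand
                    simpa [PySem.Chars.strIsalnum] using hAl)]
            rw [if_neg (by simp [hBcond])]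
            have hsp0 : pvSp ('%' :: a :: b :: rest2) =
                ([], (pvSp (a :: b :: rest2)).1 :: (pvSp (a :: b :: rest2)).2) := by
              simp [pvSp]
            rw [hsp0]
            simp only [List.map_cons, List.flatten_cons, List.nil_append]
            rw [hproc]
            rw [ih (a :: b :: rest2) (by simp only [List.length_cons]; omega) (pvPreShift hp)]
            simp
      · rw [pvScanB_cons_ne hc]
        rw [ih rest (by omega) (pvPreShift hp)]
        simp [pvSp, hc]

-- ===== VERDICT (by name: the statement is the Claim_ definition above) =====
theorem unquote_unreserved_spec : Claim_equal_unquote_unreserved := by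
  intro url _ hpre
  unfold Spec_unquote_unreserved unquote_unreserved unquote_unreserved_alt
  rw [pvSplitOn_eq]
  simp only
  rw [pvJoin_nil_flatten]
  simp only [List.flatten_cons]
  congr 1
  exact (pvMain url.toList.length url.toList le_rfl hpre).symm

theorem unquote_unreserved_raises : Claim_raises_unquote_unreserved := by
  unfold Claim_raises_unquote_unreserved
  constructor
  · intro url _ hr hpre
    obtain ⟨i, hi, h2, he, ha, hx⟩ := hr
    have hgood := hpre i hi h2 he ha
    rw [hgood] at hx
    simp at hx
  · refine ⟨by decide, by decide, ?_⟩
    apply String.toList_inj.mp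
    rw [show (unquote_unreserved_alt pvRaiseWitness_unquote_unreserved).toList
        = pvScanB pvRaiseWitness_unquote_unreserved.toList from by
      simp [unquote_unreserved_alt, String.toList_ofList]]
    decide

-- self-check: the recorded witness really lies inside Raises_ (projection of the verdict above)
theorem pvRaiseWitness_ok : Raises_unquote_unreserved pvRaiseWitness_unquote_unreserved :=
  unquote_unreserved_raises.2.2.1
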